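-- pv_equiv track=rewrite | github.com/AlexanderJCS/advent-of-code-2023 | day-3/part_2.py | get_gear_ratio
-- ===== SOURCE A (Python) =====
-- def get_num_from_coord(board: list[str], x: int, y: int) -> int:
--     """
--     If the x and y value is numerical, it returns the full number that it's connected to
--
--     :param board: The board object
--     :param x: The x index of one of the digits in the number
--     :param y: The y index of one of the digits in the number
--     :return: The full number
--     """
--
--     if not board[y][x].isdigit():
--         raise ValueError(f"The index supplied does not contain a digit!")
--
--     # Iterate backwards until you're at the first digit
--     while x >= 0 and board[y][x].isdigit():
--         x -= 1
--
--     x += 1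
--
--     # Read the number
--     number_str = ""
--     while x < len(board[y]) and board[y][x].isdigit():
--         number_str += board[y][x]
--         x += 1
--
--     return int(number_str)
--
-- def get_gear_ratio(board: list[str], x: int, y: int) -> int | None:
--     """
--     Gets the gear ratio for a specific gear.
--
--     :param board: The board
--     :param x: The x-coordinate of the gear
--     :param y: The y-coordinate of the gear
--     :return: None if the gear ratio cannot be calculated, otherwise the gear ratio
--     """
--
--     gear_values: set[int] = set()
--
--     for row_i in range(max(0, y - 1), min(len(board), y + 2)):
--         for col_i in range(max(0, x - 1), min(len(board[row_i]), x + 2)):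
--             if board[row_i][col_i].isdigit() is False:
--                 continue
--
--             gear_values.add(get_num_from_coord(board, col_i, row_i))
--
--     if len(gear_values) != 2:
--         return None
--
--     gear_values_list = list(gear_values)
--     return gear_values_list[0] * gear_values_list[1]
-- ===== SOURCE B (Python) =====
-- def get_gear_ratio(board: list[str], x: int, y: int) -> int | None:
--     """Tokenize each window row into maximal digit runs once, instead of
--     expanding the number around every digit cell."""
--     gear_values: set[int] = set()
--
--     for row_i in range(max(0, y - 1), min(len(board), y + 2)):
--         row = board[row_i]
--         n = len(row)
--         i = 0
--         while i < n:
--             if row[i].isdigit():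
--                 j = i
--                 while j < n and row[j].isdigit():
--                     j += 1
--                 # run occupies columns [i, j); window columns are [x-1, x+1]
--                 if i <= x + 1 and j - 1 >= x - 1:
--                     gear_values.add(int(row[i:j]))
--                 i = j
--             else:
--                 i += 1
--
--     if len(gear_values) != 2:
--         return None
--
--     gear_values_list = list(gear_values)
--     return gear_values_list[0] * gear_values_list[1]
-- ===== Notes on version B (the rewrite author's own statement) =====
-- stated objective: simpler
-- what changed: A expands the number around every digit cell of the 3x3 window (a backward scan then a forward re-read per cell); B instead tokenizes each window row once left-to-right into maximal digit runs and adds a run's value when its column span overlaps [x-1, x+1].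
import Mathlib
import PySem

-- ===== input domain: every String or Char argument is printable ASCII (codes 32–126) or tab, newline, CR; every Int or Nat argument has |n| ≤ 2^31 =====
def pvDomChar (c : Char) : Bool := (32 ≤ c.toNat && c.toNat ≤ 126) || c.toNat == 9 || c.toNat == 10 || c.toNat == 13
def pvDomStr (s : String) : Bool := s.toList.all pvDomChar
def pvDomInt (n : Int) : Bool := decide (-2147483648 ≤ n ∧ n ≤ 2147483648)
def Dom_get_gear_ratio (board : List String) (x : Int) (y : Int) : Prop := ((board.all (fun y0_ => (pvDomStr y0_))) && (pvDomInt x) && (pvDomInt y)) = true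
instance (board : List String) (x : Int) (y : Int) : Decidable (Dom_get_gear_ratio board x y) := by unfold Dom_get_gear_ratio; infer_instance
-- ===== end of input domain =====

-- B replaces A's per-digit backward/forward number extraction with a single left-to-right
-- tokenization of each window row into maximal digit runs (objective: simpler decomposition).

-- ===== PORT A =====

-- board[y][x].isdigit() with an in-range index (False stands for the unreachable IndexError)
def pvDigitAt (cs : List Char) (i : Int) : Bool :=
  match PySem.List.pyGet? cs i with
  | some c => PySem.Chars.isdigit c
  | none => false

-- while x >= 0 and board[y][x].isdigit(): x -= 1      (returns the final x)
def pvBack (cs : List Char) (x : Int) : Int :=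
  if 0 ≤ x ∧ pvDigitAt cs x then pvBack cs (x - 1) else x
termination_by (x + 1).toNat
decreasing_by omega

-- while x < len(board[y]) and board[y][x].isdigit(): number_str += board[y][x]; x += 1
def pvRead (cs : List Char) (x : Int) (acc : List Char) : List Char :=
  if h : x < (cs.length : Int) ∧ pvDigitAt cs x then
    pvRead cs (x + 1) (acc ++ (PySem.List.pyGet? cs x).toList)
  else acc
termination_by ((cs.length : Int) - x).toNat
decreasing_by omega

-- get_num_from_coord; none = the ValueError/IndexError paths (unreachable from get_gear_ratio)
def get_num_from_coord (board : List String) (x : Int) (y : Int) : Option Int :=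
  match PySem.List.pyGet? board y with
  | none => none
  | some row =>
    let cs := row.toList
    match PySem.List.pyGet? cs x with
    | none => none
    | some c =>
      if ¬ PySem.Chars.isdigit c then none
      else
        let x1 := pvBack cs x + 1
        PySem.Int.ofChars? (pvRead cs x1 [])

def get_gear_ratio (board : List String) (x : Int) (y : Int) : Option Int :=
  let gear_values : PySem.Set Int :=
    (PySem.List.pyRange (max 0 (y - 1)) (min (board.length : Int) (y + 2)) 1).foldl
      (fun acc row_i =>
        let cs := (PySem.List.pyGetD board row_i "").toList
        (PySem.List.pyRange (max 0 (x - 1)) (min (cs.length : Int) (x + 2)) 1).foldl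
          (fun acc col_i =>
            if pvDigitAt cs col_i = false then acc
            else
              match get_num_from_coord board col_i row_i with
              | some v => PySem.Set.add acc v
              | none => acc)   -- unreachable: the digit check above was just made
          acc)
      PySem.Set.empty
  if PySem.Set.len gear_values ≠ 2 then none
  else some (PySem.List.pyGetD gear_values 0 0 * PySem.List.pyGetD gear_values 1 0)

-- ===== PORT B =====

-- j = i; while j < n and row[j].isdigit(): j += 1
def pvRunEnd (cs : List Char) (j : Nat) : Nat :=
  if h : j < cs.length ∧ PySem.Chars.isdigit cs[j]! then pvRunEnd cs (j + 1) else j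
termination_by cs.length - j
decreasing_by omega

theorem le_pvRunEnd (cs : List Char) (j : Nat) : j ≤ pvRunEnd cs j := by
  induction j using pvRunEnd.induct cs with
  | case1 j h ih => rw [pvRunEnd, dif_pos h]; omega
  | case2 j h => rw [pvRunEnd, dif_neg h]

-- the outer while-loop of B's row tokenizer
def pvScanRow (cs : List Char) (x : Int) (i : Nat) (acc : PySem.Set Int) : PySem.Set Int :=
  if h : i < cs.length then
    if hd : PySem.Chars.isdigit cs[i]! then
      let j := pvRunEnd cs i
      let acc' :=
        if (i : Int) ≤ x + 1 ∧ x - 1 ≤ (j : Int) - 1 then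
          match PySem.Int.ofChars? (PySem.List.slice cs (some (i : Int)) (some (j : Int))) with
          | some v => PySem.Set.add acc v
          | none => acc   -- unreachable: a nonempty all-digit slice parses
        else acc
      pvScanRow cs x j acc'
    else pvScanRow cs x (i + 1) acc
  else acc
termination_by cs.length - i
decreasing_by
  · have : i < pvRunEnd cs i := by
      rw [pvRunEnd, dif_pos ⟨h, hd⟩]
      have := le_pvRunEnd cs (i + 1); omega
    omega
  · omega

def get_gear_ratio_alt (board : List String) (x : Int) (y : Int) : Option Int :=
  let gear_values : PySem.Set Int :=
    (PySem.List.pyRange (max 0 (y - 1)) (min (board.length : Int) (y + 2)) 1).foldl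
      (fun acc row_i => pvScanRow (PySem.List.pyGetD board row_i "").toList x 0 acc)
      PySem.Set.empty
  if PySem.Set.len gear_values ≠ 2 then none
  else some (PySem.List.pyGetD gear_values 0 0 * PySem.List.pyGetD gear_values 1 0)

-- ===== PRECONDITION & SPEC =====
def Spec_get_gear_ratio (board : List String) (x : Int) (y : Int) (out : Option Int) : Prop := out = get_gear_ratio_alt board x y
instance (board : List String) (x : Int) (y : Int) (out : Option Int) : Decidable (Spec_get_gear_ratio board x y out) := by unfold Spec_get_gear_ratio; infer_instance

-- ===== CLAIM (what is proved, stated in full; the proofs are below) =====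
def Claim_equal_get_gear_ratio : Prop := ∀ (board : List String) (x : Int) (y : Int), Dom_get_gear_ratio board x y → Spec_get_gear_ratio board x y (get_gear_ratio board x y)

-- ===== LEMMAS AND PROOFS =====

-- the number whose run contains column c of row cs, read the way A reads it
def pvNumAt (cs : List Char) (c : Nat) : Option Int :=
  PySem.Int.ofChars? (pvRead cs (pvBack cs (c : Int) + 1) [])

-- the values both loops contribute for row cs of the window around column x
def pvRowVal (cs : List Char) (x : Int) (m : Int) : Prop :=
  ∃ c : Nat, c < cs.length ∧ PySem.Chars.isdigit cs[c]! = true ∧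
    x - 1 ≤ (c : Int) ∧ (c : Int) ≤ x + 1 ∧ pvNumAt cs c = some m

theorem getBang_drop (cs : List Char) (i k : Nat) (h : i + k < cs.length) :
    (cs.drop i)[k]! = cs[i + k]! := by
  rw [getElem!_pos (cs.drop i) k (by simp only [List.length_drop]; omega),
    getElem!_pos cs (i + k) h, List.getElem_drop]

theorem tw_get (p : Char → Bool) :
    ∀ (l : List Char) (k : Nat), k < (l.takeWhile p).length → k < l.length ∧ p l[k]! = true
  | [], k => by simp
  | a :: l, k => by
    intro hk
    by_cases hp : p a
    · rw [List.takeWhile_cons, if_pos hp] at hk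
      cases k with
      | zero =>
        refine ⟨by simp, ?_⟩
        rw [getElem!_pos (a :: l) 0 (by simp)]
        simpa using hp
      | succ k =>
        obtain ⟨h1, h2⟩ := tw_get p l k (by simpa using hk)
        refine ⟨by simpa using h1, ?_⟩
        rw [getElem!_pos (a :: l) (k + 1) (by simp; omega), List.getElem_cons_succ,
          ← getElem!_pos l k h1]
        exact h2
    · rw [List.takeWhile_cons, if_neg hp] at hk
      simp at hk

theorem tw_end (p : Char → Bool) :
    ∀ (l : List Char), (l.takeWhile p).length < l.length → p l[(l.takeWhile p).length]! = false
  | [] => by simp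
  | a :: l => by
    intro hlt
    by_cases hp : p a
    · rw [List.takeWhile_cons, if_pos hp] at hlt ⊢
      simp only [List.length_cons] at hlt
      have h1 : (l.takeWhile p).length < l.length := by omega
      have := tw_end p l h1
      rw [List.length_cons, getElem!_pos (a :: l) ((l.takeWhile p).length + 1)
        (by simp; omega), List.getElem_cons_succ, ← getElem!_pos l (l.takeWhile p).length h1]
      exact this
    · rw [List.takeWhile_cons, if_neg hp]
      simp only [List.length_nil]
      rw [getElem!_pos (a :: l) 0 (by simp)]
      simpa using hp

theorem pvDigitAt_natCast (cs : List Char) (i : Nat) (h : i < cs.length) :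
    pvDigitAt cs (i : Int) = PySem.Chars.isdigit cs[i]! := by
  simp [pvDigitAt, PySem.List.pyGet?_natCast, List.getElem?_eq_getElem h,
    getElem!_pos cs i h]

theorem pvDigitAt_big (cs : List Char) (i : Nat) (h : cs.length ≤ i) :
    pvDigitAt cs (i : Int) = false := by
  simp [pvDigitAt, PySem.List.pyGet?_natCast, List.getElem?_eq_none_iff.mpr h]

theorem pvRead_spec (cs : List Char) (i : Nat) (acc : List Char) :
    pvRead cs (i : Int) acc = acc ++ (cs.drop i).takeWhile PySem.Chars.isdigit := by
  by_cases h : i < cs.length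
  · rw [List.drop_eq_getElem_cons h, List.takeWhile]
    by_cases hd : PySem.Chars.isdigit cs[i]
    · rw [pvRead, dif_pos]
      · have h1 : (i : Int) + 1 = ((i + 1 : Nat) : Int) := by push_cast; ring
        rw [h1, pvRead_spec cs (i + 1)]
        simp [PySem.List.pyGet?_natCast, List.getElem?_eq_getElem h, hd]
      · constructor
        · exact_mod_cast h
        · rw [pvDigitAt_natCast cs i h, getElem!_pos cs i h]; exact hd
    · rw [pvRead, dif_neg]
      · simp [hd]
      · rw [pvDigitAt_natCast cs i h, getElem!_pos cs i h]
        simp [hd]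
  · rw [pvRead, dif_neg, List.drop_eq_nil_of_le (by omega)]
    · simp
    · intro hcon; exact absurd hcon.1 (by exact_mod_cast Nat.not_lt.mpr (Nat.le_of_not_lt h))
termination_by cs.length - i
decreasing_by omega

theorem pvBack_spec (cs : List Char) (s c : Nat) (hc : c < cs.length)
    (hrun : ∀ k, s ≤ k → k ≤ c → PySem.Chars.isdigit cs[k]!)
    (hsc : s ≤ c)
    (hs : s = 0 ∨ ¬ PySem.Chars.isdigit cs[s - 1]!) :
    pvBack cs (c : Int) = (s : Int) - 1 := by
  rw [pvBack, if_pos]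
  · by_cases hq : s = c
    · subst hq
      by_cases h0 : s = 0
      · subst h0
        have h1 : ((0 : Nat) : Int) - 1 = -1 := by norm_num
        rw [h1, pvBack, if_neg (fun hcon => absurd hcon.1 (by norm_num))]
      · have hs' : ¬ PySem.Chars.isdigit cs[s - 1]! := hs.resolve_left h0
        have h1 : (s : Int) - 1 = ((s - 1 : Nat) : Int) := by omega
        rw [h1, pvBack, if_neg (fun hcon => hs'
          (by rw [pvDigitAt_natCast cs (s - 1) (by omega)] at hcon; exact hcon.2))]
    · have h1 : (c : Int) - 1 = ((c - 1 : Nat) : Int) := by omega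
      rw [h1, pvBack_spec cs s (c - 1) (by omega) (fun k hk1 hk2 => hrun k hk1 (by omega))
        (by omega) hs]
  · refine ⟨by positivity, ?_⟩
    rw [pvDigitAt_natCast cs c hc]
    exact hrun c hsc le_rfl
termination_by c - s
decreasing_by omega

theorem pvRunEnd_spec (cs : List Char) (i : Nat) :
    pvRunEnd cs i = i + ((cs.drop i).takeWhile PySem.Chars.isdigit).length := by
  by_cases h : i < cs.length
  · rw [List.drop_eq_getElem_cons h, List.takeWhile]
    by_cases hd : PySem.Chars.isdigit cs[i]
    · rw [pvRunEnd, dif_pos ⟨h, by rw [getElem!_pos cs i h]; exact hd⟩,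
        pvRunEnd_spec cs (i + 1)]
      simp [hd]; omega
    · rw [pvRunEnd, dif_neg]
      · simp [hd]
      · rw [getElem!_pos cs i h]; simp [hd]
  · rw [pvRunEnd, dif_neg (by omega), List.drop_eq_nil_of_le (by omega)]
    simp
termination_by cs.length - i
decreasing_by omega

theorem pvNumAt_run (cs : List Char) (i c : Nat)
    (hi : i = 0 ∨ PySem.Chars.isdigit cs[i - 1]! = false)
    (hc : i ≤ c) (hcl : c < pvRunEnd cs i) :
    pvNumAt cs c = PySem.Int.ofChars? ((cs.drop i).takeWhile PySem.Chars.isdigit) := by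
  have hspec := pvRunEnd_spec cs i
  set t := ((cs.drop i).takeWhile PySem.Chars.isdigit).length with ht
  have htl : t ≤ cs.length - i := by
    have h1 : t ≤ (cs.drop i).length := (List.takeWhile_sublist _).length_le
    simpa [List.length_drop] using h1
  have hrun : ∀ k, i ≤ k → k ≤ c → PySem.Chars.isdigit cs[k]! = true := by
    intro k hk1 hk2
    obtain ⟨h1, h2⟩ := tw_get PySem.Chars.isdigit (cs.drop i) (k - i) (by omega)
    rw [getBang_drop cs i (k - i) (by rw [List.length_drop] at h1; omega)] at h2
    rwa [show i + (k - i) = k by omega] at h2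
  have hclen : c < cs.length := by omega
  have hback : pvBack cs (c : Int) = (i : Int) - 1 :=
    pvBack_spec cs i c hclen hrun hc (by
      rcases hi with hi | hi
      · exact Or.inl hi
      · exact Or.inr (by simp only [hi]; simp))
  unfold pvNumAt
  rw [hback, show (i : Int) - 1 + 1 = (i : Int) by ring, pvRead_spec cs i []]
  simp

-- m ∈ pvScanRow … with the run-start invariant: what B's tokenizer collects from position i on
theorem mem_pvScanRow (cs : List Char) (x : Int) (i : Nat) (acc : PySem.Set Int) (m : Int)
    (hinv : i = 0 ∨ PySem.Chars.isdigit cs[i - 1]! = false ∨ PySem.Chars.isdigit cs[i]! = false) :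
    m ∈ pvScanRow cs x i acc ↔ m ∈ acc ∨
      ∃ c : Nat, i ≤ c ∧ c < cs.length ∧ PySem.Chars.isdigit cs[c]! = true ∧
        x - 1 ≤ (c : Int) ∧ (c : Int) ≤ x + 1 ∧ pvNumAt cs c = some m := by
  by_cases h : i < cs.length
  · by_cases hd : PySem.Chars.isdigit cs[i]! = true
    · rw [pvScanRow, dif_pos h, dif_pos hd]
      simp only []
      have hspec := pvRunEnd_spec cs i
      set j := pvRunEnd cs i with hj
      set t := ((cs.drop i).takeWhile PySem.Chars.isdigit).length with ht
      have htl : t ≤ cs.length - i := by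
        have h1 : t ≤ (cs.drop i).length := (List.takeWhile_sublist _).length_le
        simpa [List.length_drop] using h1
      have hij : i < j := by
        have h0 : 0 < t := by
          rcases Nat.eq_zero_or_pos t with h0 | h0
          · exfalso
            have h2 : t < (cs.drop i).length := by simp [List.length_drop]; omega
            have := tw_end PySem.Chars.isdigit (cs.drop i) h2
            rw [← ht, h0, getBang_drop cs i 0 (by omega), Nat.add_zero] at this
            rw [this] at hd; exact Bool.false_ne_true hd
          · exact h0
        omega
      have hrun : ∀ k, i ≤ k → k < j → k < cs.length ∧ PySem.Chars.isdigit cs[k]! = true := by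
        intro k hk1 hk2
        obtain ⟨h1, h2⟩ := tw_get PySem.Chars.isdigit (cs.drop i) (k - i) (by omega)
        rw [List.length_drop] at h1
        refine ⟨by omega, ?_⟩
        rw [getBang_drop cs i (k - i) (by omega)] at h2
        rwa [show i + (k - i) = k by omega] at h2
      have hnd : PySem.Chars.isdigit cs[j]! = false := by
        by_cases hjl : j < cs.length
        · have h2 : t < (cs.drop i).length := by simp [List.length_drop]; omega
          have := tw_end PySem.Chars.isdigit (cs.drop i) h2
          rw [← ht, getBang_drop cs i t (by omega)] at this
          rwa [show i + t = j by omega] at this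
        · rw [getElem!_neg cs j hjl]
          decide
      have hstart : i = 0 ∨ PySem.Chars.isdigit cs[i - 1]! = false := by
        rcases hinv with h1 | h1 | h1
        · exact Or.inl h1
        · exact Or.inr h1
        · rw [h1] at hd; exact absurd hd (by simp)
      have htokc : ∀ c, i ≤ c → c < j →
          pvNumAt cs c = PySem.Int.ofChars? ((cs.drop i).takeWhile PySem.Chars.isdigit) :=
        fun c hc1 hc2 => pvNumAt_run cs i c hstart hc1 hc2
      have hslice : PySem.Int.ofChars? (PySem.List.slice cs (some (i : Int)) (some (j : Int)))
          = PySem.Int.ofChars? ((cs.drop i).takeWhile PySem.Chars.isdigit) := by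
        rw [PySem.List.slice_natCast, show j - i = t by omega,
          ← List.prefix_iff_eq_take.mp (List.takeWhile_prefix _)]
      rw [mem_pvScanRow cs x j _ m (Or.inr (Or.inr hnd))]
      have hacc' : ∀ (A : PySem.Set Int),
          (m ∈ (if (i : Int) ≤ x + 1 ∧ x - 1 ≤ (j : Int) - 1 then
            match PySem.Int.ofChars? (PySem.List.slice cs (some (i : Int)) (some (j : Int))) with
            | some v => PySem.Set.add A v
            | none => A
          else A)) ↔ m ∈ A ∨ ((i : Int) ≤ x + 1 ∧ x - 1 ≤ (j : Int) - 1 ∧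
            PySem.Int.ofChars? ((cs.drop i).takeWhile PySem.Chars.isdigit) = some m) := by
        intro A
        by_cases hov : (i : Int) ≤ x + 1 ∧ x - 1 ≤ (j : Int) - 1
        · rw [if_pos hov, hslice]
          cases htok : PySem.Int.ofChars? ((cs.drop i).takeWhile PySem.Chars.isdigit) with
          | none => simp [hov]
          | some v =>
            rw [PySem.Set.mem_add]
            simp only [Option.some.injEq]
            constructor
            · rintro (hm | hm)
              · exact Or.inl hm
              · exact Or.inr ⟨hov.1, hov.2, hm.symm⟩
            · rintro (hm | ⟨_, _, hm⟩)
              · exact Or.inl hm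
              · exact Or.inr hm.symm
        · rw [if_neg hov]
          constructor
          · exact Or.inl
          · rintro (hm | ⟨h1, h2, _⟩)
            · exact hm
            · exact absurd ⟨h1, h2⟩ hov
      rw [hacc']
      constructor
      · rintro ((hm | ⟨hov1, hov2, htokm⟩) | ⟨c, hc1, hc2, hc3, hc4, hc5, hc6⟩)
        · exact Or.inl hm
        · right
          by_cases hxi : x - 1 ≤ (i : Int)
          · refine ⟨i, le_rfl, (hrun i le_rfl hij).1, (hrun i le_rfl hij).2, hxi, hov1, ?_⟩
            rw [htokc i le_rfl hij]; exact htokm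
          · have hx1 : 0 ≤ x - 1 := by omega
            refine ⟨(x - 1).toNat, by omega, ?_, ?_, by omega, by omega, ?_⟩
            · exact (hrun (x - 1).toNat (by omega) (by omega)).1
            · exact (hrun (x - 1).toNat (by omega) (by omega)).2
            · rw [htokc (x - 1).toNat (by omega) (by omega)]; exact htokm
        · exact Or.inr ⟨c, by omega, hc2, hc3, hc4, hc5, hc6⟩
      · rintro (hm | ⟨c, hc1, hc2, hc3, hc4, hc5, hc6⟩)
        · exact Or.inl (Or.inl hm)
        · by_cases hcj : c < j
          · left; right
            refine ⟨by push_cast; omega, by push_cast; omega, ?_⟩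
            rw [← htokc c hc1 hcj]; exact hc6
          · exact Or.inr ⟨c, by omega, hc2, hc3, hc4, hc5, hc6⟩
    · rw [pvScanRow, dif_pos h, dif_neg hd]
      have hd' : PySem.Chars.isdigit cs[i]! = false := by
        cases hb : PySem.Chars.isdigit cs[i]!
        · rfl
        · exact absurd hb hd
      rw [mem_pvScanRow cs x (i + 1) acc m (Or.inr (Or.inl (by simpa using hd')))]
      constructor
      · rintro (hm | ⟨c, hc1, hc2, hc3, hc4, hc5, hc6⟩)
        · exact Or.inl hm
        · exact Or.inr ⟨c, by omega, hc2, hc3, hc4, hc5, hc6⟩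
      · rintro (hm | ⟨c, hc1, hc2, hc3, hc4, hc5, hc6⟩)
        · exact Or.inl hm
        · refine Or.inr ⟨c, ?_, hc2, hc3, hc4, hc5, hc6⟩
          rcases Nat.eq_or_lt_of_le hc1 with hq | hq
          · exfalso; rw [← hq] at hc3; rw [hc3] at hd'; simp at hd'
          · omega
  · rw [pvScanRow, dif_neg h]
    constructor
    · exact Or.inl
    · rintro (hm | ⟨c, hc1, hc2, _⟩)
      · exact hm
      · omega
termination_by cs.length - i
decreasing_by
  all_goals first
  | omega
  | (have h1 : i < pvRunEnd cs i := by
       rw [pvRunEnd, dif_pos ⟨h, hd⟩]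
       have := le_pvRunEnd cs (i + 1); omega
     omega)

theorem nodup_pvScanRow (cs : List Char) (x : Int) (i : Nat) (acc : PySem.Set Int)
    (h : acc.Nodup) : (pvScanRow cs x i acc).Nodup := by
  by_cases hl : i < cs.length
  · rw [pvScanRow, dif_pos hl]
    by_cases hd : PySem.Chars.isdigit cs[i]! = true
    · rw [dif_pos hd]
      refine nodup_pvScanRow cs x (pvRunEnd cs i) _ ?_
      by_cases hov : (i : Int) ≤ x + 1 ∧ x - 1 ≤ ((pvRunEnd cs i : Nat) : Int) - 1
      · rw [if_pos hov]
        cases htok : PySem.Int.ofChars?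
            (PySem.List.slice cs (some (i : Int)) (some ((pvRunEnd cs i : Nat) : Int))) with
        | none => exact h
        | some v => exact PySem.Set.nodup_add acc v h
      · rw [if_neg hov]; exact h
    · rw [dif_neg hd]
      exact nodup_pvScanRow cs x (i + 1) acc h
  · rw [pvScanRow, dif_neg hl]; exact h
termination_by cs.length - i
decreasing_by
  all_goals first
  | omega
  | (have h1 : i < pvRunEnd cs i := by
       rw [pvRunEnd, dif_pos ⟨hl, hd⟩]
       have := le_pvRunEnd cs (i + 1); omega
     omega)

-- membership in A's inner column loop over an arbitrary column list
theorem mem_foldl_col (board : List String) (cs : List Char) (row_i : Int) :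
    ∀ (l : List Int) (acc : PySem.Set Int) (m : Int),
      m ∈ l.foldl (fun acc col_i =>
            if pvDigitAt cs col_i = false then acc
            else
              match get_num_from_coord board col_i row_i with
              | some v => PySem.Set.add acc v
              | none => acc) acc
        ↔ m ∈ acc ∨ ∃ c ∈ l, pvDigitAt cs c = true ∧ get_num_from_coord board c row_i = some m
  | [], acc, m => by simp
  | a :: l, acc, m => by
    rw [List.foldl_cons, mem_foldl_col board cs row_i l]
    have hstep : ∀ (A : PySem.Set Int),
        (m ∈ (if pvDigitAt cs a = false then A
          else
            match get_num_from_coord board a row_i with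
            | some v => PySem.Set.add A v
            | none => A))
        ↔ m ∈ A ∨ (pvDigitAt cs a = true ∧ get_num_from_coord board a row_i = some m) := by
      intro A
      by_cases hda : pvDigitAt cs a = false
      · rw [if_pos hda]
        simp [hda]
      · have hda' : pvDigitAt cs a = true := by
          cases hb : pvDigitAt cs a
          · exact absurd hb hda
          · rfl
        rw [if_neg hda]
        cases hg : get_num_from_coord board a row_i with
        | none => simp [hda']
        | some v =>
          rw [PySem.Set.mem_add]
          simp only [hda', true_and, Option.some.injEq]
          constructor
          · rintro (hm | hm)
            · exact Or.inl hm
            · exact Or.inr hm.symm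
          · rintro (hm | hm)
            · exact Or.inl hm
            · exact Or.inr hm.symm
    rw [hstep]
    simp only [List.mem_cons]
    constructor
    · rintro ((hm | hp) | ⟨c, hcl, hp⟩)
      · exact Or.inl hm
      · exact Or.inr ⟨a, Or.inl rfl, hp⟩
      · exact Or.inr ⟨c, Or.inr hcl, hp⟩
    · rintro (hm | ⟨c, (rfl | hcl), hp⟩)
      · exact Or.inl (Or.inl hm)
      · exact Or.inl (Or.inr hp)
      · exact Or.inr ⟨c, hcl, hp⟩

theorem nodup_foldl_col (board : List String) (cs : List Char) (row_i : Int) :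
    ∀ (l : List Int) (acc : PySem.Set Int), acc.Nodup →
      (l.foldl (fun acc col_i =>
            if pvDigitAt cs col_i = false then acc
            else
              match get_num_from_coord board col_i row_i with
              | some v => PySem.Set.add acc v
              | none => acc) acc).Nodup
  | [], acc, h => h
  | a :: l, acc, h => by
    rw [List.foldl_cons]
    refine nodup_foldl_col board cs row_i l _ ?_
    by_cases hda : pvDigitAt cs a = false
    · rw [if_pos hda]; exact h
    · rw [if_neg hda]
      cases hg : get_num_from_coord board a row_i with
      | none => exact h
      | some v => exact PySem.Set.nodup_add acc v h

-- get_num_from_coord at an in-range digit cell reads the number of that cell's run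
theorem gnfc_eq_numAt (board : List String) (row_i : Int) (row : String)
    (hrow : PySem.List.pyGet? board row_i = some row) (cn : Nat)
    (hlt : cn < row.toList.length) (hdig : PySem.Chars.isdigit row.toList[cn]! = true) :
    get_num_from_coord board (cn : Int) row_i = pvNumAt row.toList cn := by
  rw [get_num_from_coord, hrow]
  show (match PySem.List.pyGet? row.toList (cn : Int) with
    | none => none
    | some c =>
      if ¬ PySem.Chars.isdigit c then none
      else PySem.Int.ofChars? (pvRead row.toList (pvBack row.toList (cn : Int) + 1) [])) = _
  rw [PySem.List.pyGet?_natCast, List.getElem?_eq_getElem hlt]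
  show (if ¬ PySem.Chars.isdigit row.toList[cn] then none
    else PySem.Int.ofChars? (pvRead row.toList (pvBack row.toList (cn : Int) + 1) [])) = _
  rw [if_neg (by rw [← getElem!_pos row.toList cn hlt, hdig]; simp)]
  rfl

-- A's inner loop over the clipped window of row cs collects exactly pvRowVal
theorem mem_inner_A (board : List String) (x : Int) (row_i : Int) (row : String)
    (hrow : PySem.List.pyGet? board row_i = some row) (acc : PySem.Set Int) (m : Int) :
    (m ∈ (PySem.List.pyRange (max 0 (x - 1)) (min ((row.toList.length : Nat) : Int) (x + 2)) 1).foldl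
        (fun acc col_i =>
          if pvDigitAt row.toList col_i = false then acc
          else
            match get_num_from_coord board col_i row_i with
            | some v => PySem.Set.add acc v
            | none => acc) acc
      ↔ m ∈ acc ∨ pvRowVal row.toList x m) := by
  rw [mem_foldl_col]
  constructor
  · rintro (hm | ⟨c, hcl, hdig, hval⟩)
    · exact Or.inl hm
    · right
      rw [PySem.List.mem_pyRange_one] at hcl
      have hc0 : 0 ≤ c := le_trans (le_max_left 0 (x - 1)) hcl.1
      have hceq : c = (c.toNat : Int) := by omega
      set cn := c.toNat with hcn
      rw [hceq] at hdig hval hcl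
      have hlt : cn < row.toList.length := by
        by_contra hcon
        rw [pvDigitAt_big row.toList cn (by omega)] at hdig
        exact Bool.false_ne_true hdig
      rw [pvDigitAt_natCast row.toList cn hlt] at hdig
      refine ⟨cn, hlt, hdig, ?_, ?_, ?_⟩
      · have h1 := hcl.1
        have h2 : max 0 (x - 1) ≤ (cn : Int) := h1
        omega
      · have h2 := hcl.2
        have h3 : (cn : Int) < min ((row.toList.length : Nat) : Int) (x + 2) := h2
        omega
      · rw [gnfc_eq_numAt board row_i row hrow cn hlt hdig] at hval
        exact hval
  · rintro (hm | ⟨cn, hlt, hdig, hb1, hb2, hval⟩)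
    · exact Or.inl hm
    · right
      refine ⟨(cn : Int), ?_, ?_, ?_⟩
      · rw [PySem.List.mem_pyRange_one]
        have h1 : (0 : Int) ≤ (cn : Int) := by positivity
        have h2 : (cn : Int) < ((row.toList.length : Nat) : Int) := by exact_mod_cast hlt
        constructor
        · omega
        · omega
      · rw [pvDigitAt_natCast row.toList cn hlt]; exact hdig
      · rw [gnfc_eq_numAt board row_i row hrow cn hlt hdig]
        exact hval

theorem nodup_outer_A (board : List String) (x : Int) :
    ∀ (l : List Int) (acc : PySem.Set Int), acc.Nodup →
      (l.foldl (fun acc row_i =>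
          let cs := (PySem.List.pyGetD board row_i "").toList
          (PySem.List.pyRange (max 0 (x - 1)) (min ((cs.length : Nat) : Int) (x + 2)) 1).foldl
            (fun acc col_i =>
              if pvDigitAt cs col_i = false then acc
              else
                match get_num_from_coord board col_i row_i with
                | some v => PySem.Set.add acc v
                | none => acc) acc) acc).Nodup
  | [], acc, h => h
  | r :: l, acc, h => by
    rw [List.foldl_cons]
    exact nodup_outer_A board x l _ (nodup_foldl_col board _ r _ acc h)

theorem nodup_outer_B (board : List String) (x : Int) :
    ∀ (l : List Int) (acc : PySem.Set Int), acc.Nodup →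
      (l.foldl (fun acc row_i =>
          pvScanRow (PySem.List.pyGetD board row_i "").toList x 0 acc) acc).Nodup
  | [], acc, h => h
  | r :: l, acc, h => by
    rw [List.foldl_cons]
    exact nodup_outer_B board x l _ (nodup_pvScanRow _ x 0 acc h)

-- the two outer row loops collect the same values
theorem mem_outer_AB (board : List String) (x : Int) :
    ∀ (l : List Int), (∀ r ∈ l, 0 ≤ r ∧ r < (board.length : Int)) →
    ∀ (acc1 acc2 : PySem.Set Int), (∀ m', m' ∈ acc1 ↔ m' ∈ acc2) →
    ∀ (m : Int),
      (m ∈ l.foldl (fun acc row_i =>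
          let cs := (PySem.List.pyGetD board row_i "").toList
          (PySem.List.pyRange (max 0 (x - 1)) (min ((cs.length : Nat) : Int) (x + 2)) 1).foldl
            (fun acc col_i =>
              if pvDigitAt cs col_i = false then acc
              else
                match get_num_from_coord board col_i row_i with
                | some v => PySem.Set.add acc v
                | none => acc) acc) acc1
        ↔ m ∈ l.foldl (fun acc row_i =>
            pvScanRow (PySem.List.pyGetD board row_i "").toList x 0 acc) acc2)
  | [], _, acc1, acc2, hacc, m => by simpa using hacc m
  | r :: l, hl, acc1, acc2, hacc, m => by
    rw [List.foldl_cons, List.foldl_cons]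
    have hr := hl r (List.mem_cons_self)
    have hnat : r.toNat < board.length := by omega
    have hpy : PySem.List.pyGet? board r = some board[r.toNat] := by
      rw [PySem.List.pyGet?_of_nonneg board hr.1]
      exact List.getElem?_eq_getElem hnat
    have hgd : PySem.List.pyGetD board r "" = board[r.toNat] := by
      unfold PySem.List.pyGetD
      rw [hpy]
      rfl
    have hrow : PySem.List.pyGet? board r = some (PySem.List.pyGetD board r "") := by
      rw [hpy, hgd]
    refine mem_outer_AB board x l (fun r' hr' => hl r' (List.mem_cons_of_mem r hr')) _ _ ?_ m
    intro m'
    have hA := mem_inner_A board x r (PySem.List.pyGetD board r "") hrow acc1 m'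
    have hB := mem_pvScanRow (PySem.List.pyGetD board r "").toList x 0 acc2 m' (Or.inl rfl)
    have hmid : (m' ∈ acc1 ∨ pvRowVal (PySem.List.pyGetD board r "").toList x m') ↔
        (m' ∈ acc2 ∨ ∃ c : Nat, 0 ≤ c ∧ c < (PySem.List.pyGetD board r "").toList.length ∧
          PySem.Chars.isdigit (PySem.List.pyGetD board r "").toList[c]! = true ∧
          x - 1 ≤ (c : Int) ∧ (c : Int) ≤ x + 1 ∧
          pvNumAt (PySem.List.pyGetD board r "").toList c = some m') := by
      constructor
      · rintro (hm | ⟨c, h1, h2, h3, h4, h5⟩)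
        · exact Or.inl ((hacc m').mp hm)
        · exact Or.inr ⟨c, Nat.zero_le c, h1, h2, h3, h4, h5⟩
      · rintro (hm | ⟨c, _, h1, h2, h3, h4, h5⟩)
        · exact Or.inl ((hacc m').mpr hm)
        · exact Or.inr ⟨c, h1, h2, h3, h4, h5⟩
    exact hA.trans (hmid.trans hB.symm)

theorem prod2_of_perm (l1 l2 : List Int) (hp : l1.Perm l2) (hl : l1.length = 2) :
    PySem.List.pyGetD l1 0 0 * PySem.List.pyGetD l1 1 0
      = PySem.List.pyGetD l2 0 0 * PySem.List.pyGetD l2 1 0 := by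
  have hl2 : l2.length = 2 := by rw [← hp.length_eq, hl]
  match l1, l2, hl, hl2 with
  | [a, b], [c, d], _, _ =>
    have hprod : a * b = c * d := by
      have := hp.prod_eq
      simpa using this
    have key : ∀ (u v : Int), PySem.List.pyGetD [u, v] 0 0 = u ∧ PySem.List.pyGetD [u, v] 1 0 = v := by
      intro u v
      have h0 : PySem.List.pyGet? [u, v] 0 = some u := by
        rw [PySem.List.pyGet?_zero]; rfl
      have h1 : PySem.List.pyGet? [u, v] 1 = some v := by
        rw [show (1 : Int) = ((1 : Nat) : Int) by norm_num, PySem.List.pyGet?_natCast]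
        rfl
      unfold PySem.List.pyGetD
      rw [h0, h1]
      exact ⟨rfl, rfl⟩
    rw [(key a b).1, (key a b).2, (key c d).1, (key c d).2]
    exact hprod

-- the shared tail of both functions applied to permuted sets gives the same answer
theorem tail_of_perm (s1 s2 : PySem.Set Int) (hp : s1.Perm s2) :
    (if PySem.Set.len s1 ≠ 2 then none
      else some (PySem.List.pyGetD s1 0 0 * PySem.List.pyGetD s1 1 0)) =
    (if PySem.Set.len s2 ≠ 2 then none
      else some (PySem.List.pyGetD s2 0 0 * PySem.List.pyGetD s2 1 0) : Option Int) := by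
  have hlen : s1.length = s2.length := hp.length_eq
  simp only [PySem.Set.len, hlen]
  by_cases h2 : ((s2.length : Nat) : Int) ≠ 2
  · rw [if_pos h2, if_pos h2]
  · rw [if_neg h2, if_neg h2]
    have hl1 : s1.length = 2 := by omega
    rw [prod2_of_perm s1 s2 hp hl1]

-- ===== VERDICT (by name: the statement is the Claim_ definition above) =====
theorem get_gear_ratio_spec : Claim_equal_get_gear_ratio := by
  intro board x y _
  unfold Spec_get_gear_ratio get_gear_ratio get_gear_ratio_alt
  have hrange : ∀ r ∈ PySem.List.pyRange (max 0 (y - 1)) (min ((board.length : Nat) : Int) (y + 2)) 1,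
      0 ≤ r ∧ r < (board.length : Int) := by
    intro r hr
    rw [PySem.List.mem_pyRange_one] at hr
    constructor
    · exact le_trans (le_max_left 0 (y - 1)) hr.1
    · exact lt_of_lt_of_le hr.2 (min_le_left _ _)
  have hmem := mem_outer_AB board x
    (PySem.List.pyRange (max 0 (y - 1)) (min ((board.length : Nat) : Int) (y + 2)) 1)
    hrange PySem.Set.empty PySem.Set.empty (fun _ => Iff.rfl)
  have hnd1 := nodup_outer_A board x
    (PySem.List.pyRange (max 0 (y - 1)) (min ((board.length : Nat) : Int) (y + 2)) 1)
    PySem.Set.empty List.nodup_nil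
  have hnd2 := nodup_outer_B board x
    (PySem.List.pyRange (max 0 (y - 1)) (min ((board.length : Nat) : Int) (y + 2)) 1)
    PySem.Set.empty List.nodup_nil
  have hperm := (List.perm_ext_iff_of_nodup hnd1 hnd2).mpr hmem
  exact tail_of_perm _ _ hperm
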